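-- pv_equiv track=rewrite | github.com/BernardFW/Aramis | src/aramis/trigram.py | make_trigrams
-- ===== SOURCE A (Python) =====
-- from collections import deque
-- from typing import Iterable, Optional, Tuple, TypeVar
--
-- T = TypeVar("T")
--
-- def make_trigrams(
--     i: Iterable[T],
-- ) -> Iterable[Tuple[Optional[T], Optional[T], Optional[T]]]:
--     """
--     Compute all trigrams of an iterable and yield them. You probably want
--     to do something like:
--
--     >>> t = set(make_trigrams('hi there'))
--     """
--     q = deque([None, None, None])
--
--     def nxt():
--         q.append(x)
--         q.popleft()
--         return tuple(c if c is not None else " " for c in q)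
--
--     for x in i:
--         yield nxt()
--
--     if q[-1] is not None:
--         x = None
--         yield nxt()
-- ===== SOURCE B (Python) =====
-- def make_trigrams(i):
--     """Yield all trigrams of an iterable (padded with ' '), via a prebuilt padded list."""
--     elems = list(i)
--     if not elems:
--         return
--     padded = [None, None] + elems + [None]
--     f = lambda c: c if c is not None else " "
--     for j in range(len(padded) - 2):
--         yield (f(padded[j]), f(padded[j + 1]), f(padded[j + 2]))
-- ===== Notes on version B (the rewrite author's own statement) =====
-- stated objective: simpler
-- what changed: B replaces the streaming 3-slot deque with mutated closure state plus a separate trailing-flush yield by a prebuilt padded list [None,None]+L+[None] indexed by a single sliding-window loop.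
import Mathlib
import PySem

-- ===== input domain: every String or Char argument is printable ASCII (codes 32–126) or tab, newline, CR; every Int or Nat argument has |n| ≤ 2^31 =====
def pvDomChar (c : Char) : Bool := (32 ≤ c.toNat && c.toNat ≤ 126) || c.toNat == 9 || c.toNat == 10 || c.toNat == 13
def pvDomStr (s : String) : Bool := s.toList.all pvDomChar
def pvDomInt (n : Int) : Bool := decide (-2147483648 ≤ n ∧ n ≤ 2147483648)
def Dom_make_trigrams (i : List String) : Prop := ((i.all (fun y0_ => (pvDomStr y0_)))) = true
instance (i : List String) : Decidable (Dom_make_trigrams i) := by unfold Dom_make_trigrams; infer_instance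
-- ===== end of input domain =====

-- B replaces A's streaming 3-slot deque (mutated closure state + separate trailing flush)
-- by a prebuilt padded list scanned with a sliding index window; same values, objective: simpler.

-- ===== PORT A =====
-- `None if c is None else " "` applied to a slot
def pyBlank (c : Option String) : String := c.getD " "

-- q.append(x); q.popleft() on the 3-element deque
def nxtQ (q : List (Option String)) (x : Option String) : List (Option String) :=
  (q ++ [x]).drop 1

-- tuple(c if c is not None else " " for c in q)
def tripOf (q : List (Option String)) : String × String × String :=
  (pyBlank (q.getD 0 none), pyBlank (q.getD 1 none), pyBlank (q.getD 2 none))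

-- the `for x in i: yield nxt()` loop followed by the `if q[-1] is not None` flush
def loopA : List (Option String) → List String → List (String × String × String)
  | q, [] => if (q.getD 2 none).isSome then [tripOf (nxtQ q none)] else []
  | q, x :: xs => tripOf (nxtQ q (some x)) :: loopA (nxtQ q (some x)) xs

def make_trigrams (i : List String) : List (String × String × String) :=
  loopA [none, none, none] i

-- ===== PORT B =====
def make_trigrams_alt (i : List String) : List (String × String × String) :=
  if i = [] then []
  else
    let padded : List (Option String) := [none, none] ++ i.map some ++ [none]
    (List.range (padded.length - 2)).map (fun j =>
      (pyBlank (padded.getD j none), pyBlank (padded.getD (j + 1) none),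
       pyBlank (padded.getD (j + 2) none)))

-- ===== PRECONDITION & SPEC =====
def Spec_make_trigrams (i : List String) (out : List (String × String × String)) : Prop := out = make_trigrams_alt i
instance (i : List String) (out : List (String × String × String)) : Decidable (Spec_make_trigrams i out) := by unfold Spec_make_trigrams; infer_instance

-- ===== CLAIM (what is proved, stated in full; the proofs are below) =====
def Claim_equal_make_trigrams : Prop := ∀ (i : List String), Dom_make_trigrams i → Spec_make_trigrams i (make_trigrams i)

-- ===== LEMMAS AND PROOFS =====

-- all length-3 windows of a list of option-slots, blanks filled in
def winTrips : List (Option String) → List (String × String × String)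
  | a :: b :: c :: rest => (pyBlank a, pyBlank b, pyBlank c) :: winTrips (b :: c :: rest)
  | _ => []
termination_by l => l.length

theorem loopA_eq_winTrips (xs : List String) : ∀ (c a b : Option String),
    b.isSome = true ∨ xs ≠ [] →
    loopA [c, a, b] xs = winTrips (a :: b :: xs.map some ++ [none]) := by
  induction xs with
  | nil =>
      intro c a b h
      rcases h with h | h
      · simp [loopA, nxtQ, tripOf, winTrips, h, List.getD, pyBlank]
      · exact absurd rfl h
  | cons x xs ih =>
      intro c a b _
      simp only [loopA, nxtQ, List.map, List.cons_append, winTrips]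
      congr 1
      exact ih a b (some x) (Or.inl rfl)

theorem range_map_eq_winTrips : ∀ (p : List (Option String)),
    (List.range (p.length - 2)).map (fun j =>
      (pyBlank (p.getD j none), pyBlank (p.getD (j + 1) none),
       pyBlank (p.getD (j + 2) none))) = winTrips p
  | [] => by simp [winTrips]
  | [a] => by simp [winTrips]
  | [a, b] => by simp [winTrips]
  | a :: b :: c :: rest => by
      have hlen : (a :: b :: c :: rest).length - 2 = (rest.length + 1) := by
        simp
      rw [hlen, List.range_succ_eq_map, List.map_cons, List.map_map]
      simp only [winTrips]
      congr 1
      have hrest : (b :: c :: rest).length - 2 = rest.length := by simp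
      have ih := range_map_eq_winTrips (b :: c :: rest)
      rw [hrest] at ih
      exact ih
termination_by p => p.length

theorem make_trigrams_eq (i : List String) : make_trigrams i = make_trigrams_alt i := by
  cases i with
  | nil => simp [make_trigrams, make_trigrams_alt, loopA, List.getD]
  | cons x xs =>
      rw [make_trigrams, make_trigrams_alt]
      rw [if_neg (by simp)]
      rw [loopA_eq_winTrips (x :: xs) none none none (Or.inr (by simp))]
      rw [range_map_eq_winTrips]
      simp

-- ===== VERDICT (by name: the statement is the Claim_ definition above) =====
theorem make_trigrams_spec : Claim_equal_make_trigrams := by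
  intro i _
  unfold Spec_make_trigrams
  exact make_trigrams_eq i
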